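-- pv_equiv track=rewrite | github.com/leedonggyu1848/baekjoon | 프로그래머스/4/118670. 행렬과 연산/행렬과 연산.py | solution
-- ===== SOURCE A (Python) =====
-- from collections import deque
--
-- def rotate(left_q, mid_qs, right_q):
--     mid_qs[0].appendleft(left_q.popleft())
--     right_q.appendleft(mid_qs[0].pop())
--     mid_qs[-1].append(right_q.pop())
--     left_q.append(mid_qs[-1].popleft())
--
-- def shift(left_q, mid_qs, right_q):
--     left_q.appendleft(left_q.pop())
--     mid_qs.appendleft(mid_qs.pop())
--     right_q.appendleft(right_q.pop())
--
-- def solution(rc, operations):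
--     left_q = deque()
--     right_q = deque()
--     for y in range(len(rc)):
--         left_q.append(rc[y][0])
--         right_q.append(rc[y][-1])
--     mid_qs = deque()
--     for y in range(len(rc)):
--         mid_q = deque()
--         for x in range(1, len(rc[0]) - 1):
--             mid_q.append(rc[y][x])
--         mid_qs.append(mid_q)
--
--     for operation in operations:
--         if operation == "Rotate":
--             rotate(left_q, mid_qs, right_q)
--         else:
--             shift(left_q, mid_qs, right_q)
--
--     y = 0
--     x = 0
--     while mid_qs:
--         x = 0
--         rc[y][x] = left_q.popleft()
--         x += 1
--         mid_q = mid_qs.popleft()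
--         while mid_q:
--             rc[y][x] = mid_q.popleft()
--             x += 1
--         rc[y][x] = right_q.popleft()
--         y += 1
--     return rc
-- ===== SOURCE B (Python) =====
-- # B: keeps the full 2D matrix and applies each operation as a whole-grid transform
-- # (border-ring rotation / cyclic row shift) instead of A's left/right column queues
-- # plus deque-of-deques middle. Note: A mutates rc in place; B leaves rc untouched
-- # and returns a fresh matrix (the equivalence is about the return value).
--
-- def _rotate(g):
--     if len(g) == 1:
--         row = g[0]
--         return [[row[-1]] + row[:-1]]
--     res = [[g[1][0]] + g[0][:-1]]
--     for y in range(1, len(g) - 1):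
--         res.append([g[y + 1][0]] + g[y][1:-1] + [g[y - 1][-1]])
--     res.append(g[-1][1:] + [g[-2][-1]])
--     return res
--
-- def solution(rc, operations):
--     g = [list(row) for row in rc]
--     for op in operations:
--         if op == "Rotate":
--             g = _rotate(g)
--         else:
--             g = g[-1:] + g[:-1]
--     return g
-- ===== Notes on version B (the rewrite author's own statement) =====
-- stated objective: simpler
-- what changed: B keeps the whole matrix as a list of rows and applies each operation as a grid transform (rotate the border ring clockwise by rebuilding top / middle / bottom rows; shift = move the last row to the front), instead of A's mutable left/right column deques plus a deque of middle-row deques with a final write-back into the input.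
-- outside the precondition, e.g. on solution([[1, 2], [3, 4, 5]], []): A returns [[1, 2], [3, 5, 5]], B returns [[1, 2], [3, 4, 5]]; on solution([[1, 2, 3]], ['Rotate']): A returns [[1, 3, 2]], B returns [[3, 1, 2]]
import Mathlib
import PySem

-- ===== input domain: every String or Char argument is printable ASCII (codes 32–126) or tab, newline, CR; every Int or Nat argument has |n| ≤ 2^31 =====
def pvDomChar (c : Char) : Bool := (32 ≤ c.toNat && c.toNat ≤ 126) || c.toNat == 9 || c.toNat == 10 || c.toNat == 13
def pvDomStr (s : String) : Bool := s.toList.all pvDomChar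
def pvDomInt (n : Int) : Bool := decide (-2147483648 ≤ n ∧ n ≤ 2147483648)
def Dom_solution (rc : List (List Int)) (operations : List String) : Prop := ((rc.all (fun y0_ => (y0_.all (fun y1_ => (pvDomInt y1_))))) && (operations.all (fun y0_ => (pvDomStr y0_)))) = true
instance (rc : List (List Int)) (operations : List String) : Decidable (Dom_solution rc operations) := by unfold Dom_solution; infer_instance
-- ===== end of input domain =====

-- B keeps the whole matrix and transforms it per operation (border-ring rotation /
-- cyclic row shift) instead of A's left/right column queues plus a deque of middle
-- rows; objective: simpler.  A mutates rc in place; B does not — the equivalence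
-- proved here is about the return value only.

-- ===== PORT A =====
-- def rotate(left_q, mid_qs, right_q) — deque surgery; mid_qs[0]/mid_qs[-1] may alias
-- (rc of one row): modelled by re-reading mid_qs after each set, which is exact.
def rotateA (lq : List Int) (mq : List (List Int)) (rq : List Int) :
    List Int × List (List Int) × List Int :=
  -- mid_qs[0].appendleft(left_q.popleft())
  let v1 := lq.headI
  let lq := lq.tail
  let mq := mq.set 0 (v1 :: mq.headI)
  -- right_q.appendleft(mid_qs[0].pop())
  let m0 := mq.headI
  let v2 := (m0.getLast?).getD 0
  let mq := mq.set 0 m0.dropLast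
  let rq := v2 :: rq
  -- mid_qs[-1].append(right_q.pop())
  let v3 := (rq.getLast?).getD 0
  let rq := rq.dropLast
  let mq := mq.set (mq.length - 1) ((mq.getLast?).getD [] ++ [v3])
  -- left_q.append(mid_qs[-1].popleft())
  let ml := (mq.getLast?).getD []
  let v4 := ml.headI
  let mq := mq.set (mq.length - 1) ml.tail
  let lq := lq ++ [v4]
  (lq, mq, rq)

-- q.appendleft(q.pop()): rotate a deque right by one
def shiftA {α : Type} [Inhabited α] (q : List α) : List α :=
  ((q.getLast?).getD default) :: q.dropLast

-- the final while-loop: write the queues back into rc row by row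
def writeMidA (row : List Int) (x : Nat) (m : List Int) : List Int :=
  match m with
  | [] => row
  | v :: vs => writeMidA (row.set x v) (x + 1) vs

def rebuildA (rc : List (List Int)) (y : Nat) (lq : List Int) (mq : List (List Int))
    (rq : List Int) : List (List Int) :=
  match mq with
  | [] => rc
  | m :: rest =>
      let row := rc.getD y []
      let row := row.set 0 lq.headI
      let row := writeMidA row 1 m
      let row := row.set (1 + m.length) rq.headI
      rebuildA (rc.set y row) (y + 1) lq.tail rest rq.tail

def solution (rc : List (List Int)) (operations : List String) : List (List Int) :=
  -- left_q / right_q: first and last entry of each row (rc[y][0], rc[y][-1])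
  let lq := (PySem.List.pyRange 0 rc.length 1).map
      (fun y => PySem.List.pyGetD (PySem.List.pyGetD rc y []) 0 0)
  let rq := (PySem.List.pyRange 0 rc.length 1).map
      (fun y => PySem.List.pyGetD (PySem.List.pyGetD rc y []) (-1) 0)
  -- mid_qs: rc[y][x] for x in range(1, len(rc[0]) - 1)
  let mq := (PySem.List.pyRange 0 rc.length 1).map
      (fun y => (PySem.List.pyRange 1 ((PySem.List.pyGetD rc 0 []).length - 1) 1).map
        (fun x => PySem.List.pyGetD (PySem.List.pyGetD rc y []) x 0))
  let s := operations.foldl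
      (fun (s : List Int × List (List Int) × List Int) op =>
        if op == "Rotate" then rotateA s.1 s.2.1 s.2.2
        else (shiftA s.1, shiftA s.2.1, shiftA s.2.2))
      (lq, mq, rq)
  rebuildA rc 0 s.1 s.2.1 s.2.2

-- ===== PORT B =====
def rotateB (g : List (List Int)) : List (List Int) :=
  if g.length == 1 then
    -- [[row[-1]] + row[:-1]]
    let row := PySem.List.pyGetD g 0 []
    [PySem.List.pyGetD row (-1) 0 :: PySem.List.slice row none (some (-1))]
  else
    -- res = [[g[1][0]] + g[0][:-1]]
    let res := [PySem.List.pyGetD (PySem.List.pyGetD g 1 []) 0 0 ::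
                PySem.List.slice (PySem.List.pyGetD g 0 []) none (some (-1))]
    -- for y in range(1, len(g)-1): res.append([g[y+1][0]] + g[y][1:-1] + [g[y-1][-1]])
    let res := (PySem.List.pyRange 1 ((g.length : Int) - 1) 1).foldl
      (fun res y => res ++
        [PySem.List.pyGetD (PySem.List.pyGetD g (y + 1) []) 0 0 ::
         (PySem.List.slice (PySem.List.pyGetD g y []) (some 1) (some (-1)) ++
          [PySem.List.pyGetD (PySem.List.pyGetD g (y - 1) []) (-1) 0])]) res
    -- res.append(g[-1][1:] + [g[-2][-1]])
    res ++ [PySem.List.slice (PySem.List.pyGetD g (-1) []) (some 1) none ++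
            [PySem.List.pyGetD (PySem.List.pyGetD g (-2) []) (-1) 0]]

def solution_alt (rc : List (List Int)) (operations : List String) : List (List Int) :=
  -- g = [list(row) for row in rc]
  let g := rc.map (fun row => row)
  operations.foldl
    (fun g op =>
      if op == "Rotate" then rotateB g
      -- g = g[-1:] + g[:-1]
      else PySem.List.slice g (some (-1)) none ++ PySem.List.slice g none (some (-1)))
    g

-- ===== PRECONDITION & SPEC =====
-- Pre_ excludes (a) exactly the inputs where A raises IndexError (a non-empty rc whose
-- rows are not all of the first row's length or are shorter than 2, or an empty rc with
-- a non-empty operation list); (b) non-rectangular inputs with rows LONGER than the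
-- first row, on which A's returned value is an artifact of writing the result back into
-- the mutated input through the first row's width; and (c) one-row matrices of width
-- ≥ 3 combined with a "Rotate": the original task guarantees at least two rows, so what
-- rotating the border ring of a single row means is unspecified — A's deque surgery
-- swaps the row's last two entries, B rotates the whole row one step, and neither
-- reading is the specified one.  See the cites in claim.json.
def Pre_solution (rc : List (List Int)) (operations : List String) : Prop :=
  (∀ row ∈ rc, row.length = rc.headI.length ∧ 2 ≤ row.length) ∧
  (rc = [] → operations = []) ∧
  ¬ (rc.length = 1 ∧ 3 ≤ rc.headI.length ∧ "Rotate" ∈ operations)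
instance (rc : List (List Int)) (operations : List String) :
    Decidable (Pre_solution rc operations) := by unfold Pre_solution; infer_instance

def pvWitness_solution : List (List Int) × List String := ([[1, 2], [3, 4]], ["Rotate"])

def Spec_solution (rc : List (List Int)) (operations : List String)
    (out : List (List Int)) : Prop :=
  out = solution_alt rc operations
instance (rc : List (List Int)) (operations : List String) (out : List (List Int)) :
    Decidable (Spec_solution rc operations out) := by unfold Spec_solution; infer_instance

-- ===== CLAIM (what is proved, stated in full; the proofs are below) =====
def Claim_equal_solution : Prop := ∀ (rc : List (List Int)) (operations : List String), Dom_solution rc operations → Pre_solution rc operations → Spec_solution rc operations (solution rc operations)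

-- ===== LEMMAS AND PROOFS =====

-- zip the left column, middle rows and right column back into a matrix
def glueQ : List Int → List (List Int) → List Int → List (List Int)
  | a :: as, m :: ms, c :: cs => (a :: (m ++ [c])) :: glueQ as ms cs
  | _, _, _ => []

theorem glueQ_nil_mid (a : List Int) (c : List Int) : glueQ a [] c = [] := by
  cases a <;> cases c <;> rfl

theorem glueQ_cons (a0 : Int) (as : List Int) (m0 : List Int) (ms : List (List Int))
    (c0 : Int) (cs : List Int) :
    glueQ (a0 :: as) (m0 :: ms) (c0 :: cs) = (a0 :: (m0 ++ [c0])) :: glueQ as ms cs := rfl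

theorem length_glueQ (a : List Int) (m : List (List Int)) (c : List Int)
    (h1 : a.length = m.length) (h2 : c.length = m.length) :
    (glueQ a m c).length = m.length := by
  induction m generalizing a c with
  | nil => simp [glueQ_nil_mid]
  | cons m0 ms ih =>
      cases a with
      | nil => simp at h1
      | cons a0 as =>
          cases c with
          | nil => simp at h2
          | cons c0 cs =>
              simp only [glueQ_cons, List.length_cons] at *
              rw [ih as cs (by omega) (by omega)]

theorem getElem_glueQ (a : List Int) (m : List (List Int)) (c : List Int) (i : Nat)
    (ha : i < a.length) (hm : i < m.length) (hc : i < c.length)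
    (hg : i < (glueQ a m c).length) :
    (glueQ a m c)[i] = a.get ⟨i, ha⟩ :: (m.get ⟨i, hm⟩ ++ [c.get ⟨i, hc⟩]) := by
  induction i generalizing a m c with
  | zero =>
      cases a with | nil => simp at ha | cons a0 as =>
      cases m with | nil => simp at hm | cons m0 ms =>
      cases c with | nil => simp at hc | cons c0 cs =>
      rfl
  | succ j ih =>
      cases a with | nil => simp at ha | cons a0 as =>
      cases m with | nil => simp at hm | cons m0 ms =>
      cases c with | nil => simp at hc | cons c0 cs =>
      simp only [glueQ_cons, List.getElem_cons_succ]
      exact ih as ms cs (by simpa using ha) (by simpa using hm) (by simpa using hc)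
        (by simp only [glueQ_cons, List.length_cons] at hg; omega)

theorem glueQ_append (a1 a2 : List Int) (m1 m2 : List (List Int)) (c1 c2 : List Int)
    (h1 : a1.length = m1.length) (h2 : c1.length = m1.length) :
    glueQ (a1 ++ a2) (m1 ++ m2) (c1 ++ c2) = glueQ a1 m1 c1 ++ glueQ a2 m2 c2 := by
  induction m1 generalizing a1 c1 with
  | nil =>
      simp_all [List.length_eq_zero_iff, glueQ_nil_mid]
  | cons m0 ms ih =>
      cases a1 with | nil => simp at h1 | cons a0 as =>
      cases c1 with | nil => simp at h2 | cons c0 cs =>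
      simp only [List.cons_append, glueQ_cons]
      rw [ih as cs (by simpa using h1) (by simpa using h2)]

theorem glueQ_map {γ : Type} (l : List γ) (f1 : γ → Int) (f2 : γ → List Int) (f3 : γ → Int) :
    glueQ (l.map f1) (l.map f2) (l.map f3) = l.map (fun x => f1 x :: (f2 x ++ [f3 x])) := by
  induction l with
  | nil => rfl
  | cons x xs ih => simp only [List.map_cons, glueQ_cons, ih]

theorem setAppendLen {α : Type} (p t : List α) (b : α) :
    (p ++ t).set p.length b = p ++ t.set 0 b := by
  induction p with
  | nil => rfl
  | cons x xs ih => simp [ih]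

theorem getDAppendLen {α : Type} (p t : List α) (d : α) :
    (p ++ t).getD p.length d = t.getD 0 d := by
  induction p with
  | nil => rfl
  | cons x xs ih => simpa using ih

theorem sliceMid (xs : List Int) :
    PySem.List.slice xs (some 1) (some (-1)) = xs.tail.dropLast := by
  rcases xs with _ | ⟨a, t⟩
  · simp [PySem.List.slice, PySem.List.clampIdx]
  · simp [PySem.List.slice, PySem.List.clampIdx, List.dropLast_eq_take]
    congr 1
    split_ifs with h <;> simp_all <;> omega

theorem map_pyRange_getD {β : Type} (l : List (List Int)) (F : List Int → β) :
    (PySem.List.pyRange 0 l.length 1).map (fun y => F (PySem.List.pyGetD l y [])) = l.map F := by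
  apply List.ext_getElem
  · simp [PySem.List.length_pyRange_one]
  · intro i h1 h2
    simp only [List.getElem_map]
    rw [PySem.List.getElem_pyRange_one 0 l.length i
      (by simpa [PySem.List.length_pyRange_one] using h2)]
    rw [zero_add, PySem.List.pyGetD_natCast]
    congr 1
    rw [List.getD_eq_getElem l [] (by simpa using h2)]

theorem midRow (row : List Int) (w : Nat) (h : row.length = w) (hw : 2 ≤ w) :
    (PySem.List.pyRange 1 ((w : Int) - 1) 1).map (fun x => PySem.List.pyGetD row x 0) =
      row.tail.dropLast := by
  apply List.ext_getElem
  · simp [PySem.List.length_pyRange_one, h]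
  · intro i h1 h2
    have hi : i < w - 2 := by
      simp [PySem.List.length_pyRange_one] at h1 ; omega
    simp only [List.getElem_map]
    rw [PySem.List.getElem_pyRange_one 1 ((w : Int) - 1) i
      (by simpa using h1)]
    have : (1 : Int) + (i : Int) = ((1 + i : Nat) : Int) := by push_cast ; ring
    rw [this, PySem.List.pyGetD_natCast]
    rw [List.getElem_dropLast, List.getElem_tail]
    rw [List.getD_eq_getElem row 0 (by omega)]
    congr 1
    omega

theorem rowGlue (row : List Int) (h : 2 ≤ row.length) :
    PySem.List.pyGetD row 0 0 :: (row.tail.dropLast ++ [PySem.List.pyGetD row (-1) 0]) = row := by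
  cases row with
  | nil => simp at h
  | cons x t =>
      have ht : t ≠ [] := by intro he ; rw [he] at h ; simp at h
      obtain ⟨s, y, hs⟩ := (List.eq_nil_or_concat t).resolve_left ht
      rw [List.concat_eq_append] at hs
      subst hs
      rw [PySem.List.pyGetD_zero_cons]
      have : (x :: (s ++ [y])) = (x :: s) ++ [y] := by simp
      rw [this, PySem.List.pyGetD_neg_one_append_singleton]
      simp

theorem writeMidW (m : List Int) : ∀ (p s : List Int), m.length ≤ s.length →
    writeMidA (p ++ s) p.length m = p ++ m ++ s.drop m.length := by
  induction m with
  | nil => intro p s _ ; simp [writeMidA]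
  | cons v vs ih =>
      intro p s hlen
      cases s with
      | nil => simp at hlen
      | cons t0 ts =>
          rw [writeMidA]
          rw [show (p ++ t0 :: ts).set p.length v = (p ++ [v]) ++ ts by
            rw [setAppendLen] ; simp]
          rw [show p.length + 1 = (p ++ [v]).length by simp]
          rw [ih (p ++ [v]) ts (by simpa using hlen)]
          simp

theorem rowWrite (s0 : List Int) (m : List Int) (a b : Int)
    (h : s0.length = m.length + 2) :
    ((writeMidA (s0.set 0 a) 1 m).set (1 + m.length) b) = a :: (m ++ [b]) := by
  cases s0 with
  | nil => simp at h
  | cons u v =>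
      rw [List.set_cons_zero]
      have hv : v.length = m.length + 1 := by simpa using h
      have hw := writeMidW m [a] v (by omega)
      simp only [List.length_cons, List.length_nil] at hw
      rw [show (a :: v) = [a] ++ v by rfl, hw]
      obtain ⟨z, hz⟩ : ∃ z, v.drop m.length = [z] := by
        have : (v.drop m.length).length = 1 := by simp [hv]
        cases hd : v.drop m.length with
        | nil => rw [hd] at this ; simp at this
        | cons z zs =>
            rw [hd] at this ; simp at this
            exact ⟨z, by simp [this]⟩
      rw [hz]
      rw [show ([a] ++ m ++ [z] : List Int) = (a :: m) ++ [z] by simp]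
      rw [show 1 + m.length = (a :: m).length by simp [Nat.add_comm]]
      rw [setAppendLen]
      simp

theorem rebuildEq (w : Nat) (mq : List (List Int)) :
    ∀ (pre suf : List (List Int)) (lq rq : List Int),
    suf.length = mq.length → lq.length = mq.length → rq.length = mq.length →
    (∀ x ∈ mq, x.length + 2 = w) → (∀ row ∈ suf, row.length = w) →
    rebuildA (pre ++ suf) pre.length lq mq rq = pre ++ glueQ lq mq rq := by
  induction mq with
  | nil =>
      intro pre suf lq rq hsuf _ _ _ _
      rw [List.length_eq_zero_iff.mp hsuf]
      simp [rebuildA, glueQ_nil_mid]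
  | cons m rest ih =>
      intro pre suf lq rq hsuf hlq hrq hmw hrow
      cases suf with | nil => simp at hsuf | cons s0 srest =>
      cases lq with | nil => simp at hlq | cons a lq' =>
      cases rq with | nil => simp at hrq | cons b rq' =>
      rw [rebuildA]
      have hget : (pre ++ s0 :: srest).getD pre.length [] = s0 := by
        rw [getDAppendLen] ; rfl
      have hs0 : s0.length = m.length + 2 := by
        have h1 : s0.length = w := hrow s0 (by simp)
        have h2 : m.length + 2 = w := hmw m (by simp)
        omega
      simp only [hget, List.headI, List.tail_cons]
      rw [rowWrite s0 m a b hs0]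
      rw [show (pre ++ s0 :: srest).set pre.length (a :: (m ++ [b])) =
            (pre ++ [a :: (m ++ [b])]) ++ srest by rw [setAppendLen] ; simp]
      rw [show pre.length + 1 = (pre ++ [a :: (m ++ [b])]).length by simp]
      rw [ih (pre ++ [a :: (m ++ [b])]) srest lq' rq' (by simpa using hsuf)
        (by simpa using hlq) (by simpa using hrq)
        (fun x hx => hmw x (by simp [hx]))
        (fun row hr => hrow row (by simp [hr]))]
      simp [glueQ_cons]

theorem rotateA_eq (l0 : Int) (lt : List Int) (m0 ml : List Int) (mi : List (List Int))
    (r0 rl : Int) (ri : List Int) :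
    rotateA (l0 :: lt) (m0 :: (mi ++ [ml])) (r0 :: (ri ++ [rl])) =
      (lt ++ [(ml ++ [rl]).headI],
       (l0 :: m0).dropLast :: (mi ++ [(ml ++ [rl]).tail]),
       (l0 :: m0).getLast (by simp) :: r0 :: ri) := by
  simp only [rotateA, List.headI, List.tail_cons, List.set_cons_zero]
  have hlast1 : ((l0 :: m0).getLast?).getD 0 = (l0 :: m0).getLast (by simp) := by
    rw [List.getLast?_eq_some_getLast (by simp)] ; rfl
  rw [hlast1]
  have h2 : (((l0 :: m0).getLast (by simp) :: r0 :: (ri ++ [rl])).getLast?).getD 0 = rl := by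
    rw [show ((l0 :: m0).getLast (by simp) :: r0 :: (ri ++ [rl]))
        = ((l0 :: m0).getLast (by simp) :: r0 :: ri) ++ [rl] by simp, List.getLast?_concat]
    rfl
  rw [h2]
  have h3 : ((l0 :: m0).getLast (by simp) :: r0 :: (ri ++ [rl])).dropLast
      = (l0 :: m0).getLast (by simp) :: r0 :: ri := by
    rw [show ((l0 :: m0).getLast (by simp) :: r0 :: (ri ++ [rl]))
        = ((l0 :: m0).getLast (by simp) :: r0 :: ri) ++ [rl] by simp, List.dropLast_concat]
  rw [h3]
  have hlen : ((l0 :: m0).dropLast :: (mi ++ [ml])).length - 1 = ((l0 :: m0).dropLast :: mi).length := by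
    simp
  rw [hlen]
  have h4 : (((l0 :: m0).dropLast :: (mi ++ [ml])).getLast?).getD [] = ml := by
    rw [show ((l0 :: m0).dropLast :: (mi ++ [ml])) = ((l0 :: m0).dropLast :: mi) ++ [ml] by simp,
      List.getLast?_concat]
    rfl
  rw [h4]
  rw [show ((l0 :: m0).dropLast :: (mi ++ [ml])) = ((l0 :: m0).dropLast :: mi) ++ [ml] by simp]
  rw [setAppendLen]
  simp only [List.set_cons_zero]
  rw [show (((l0 :: m0).dropLast :: mi) ++ [ml ++ [rl]]) = ((l0 :: m0).dropLast :: (mi ++ [ml ++ [rl]])) by simp]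
  have hlen2 : ((l0 :: m0).dropLast :: (mi ++ [ml ++ [rl]])).length - 1 = ((l0 :: m0).dropLast :: mi).length := by
    simp
  rw [hlen2]
  have h5 : (((l0 :: m0).dropLast :: (mi ++ [ml ++ [rl]])).getLast?).getD [] = ml ++ [rl] := by
    rw [show ((l0 :: m0).dropLast :: (mi ++ [ml ++ [rl]])) = ((l0 :: m0).dropLast :: mi) ++ [ml ++ [rl]] by simp,
      List.getLast?_concat]
    rfl
  rw [h5]
  rw [show ((l0 :: m0).dropLast :: (mi ++ [ml ++ [rl]])) = ((l0 :: m0).dropLast :: mi) ++ [ml ++ [rl]] by simp]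
  rw [setAppendLen]
  simp


theorem headI_cons_tail (l : List Int) (h : l ≠ []) : l.headI :: l.tail = l := by
  cases l with
  | nil => simp at h
  | cons x xs => rfl

theorem getD_glueQ (A : List Int) (M : List (List Int)) (C : List Int) (j : Nat)
    (h1 : A.length = M.length) (h2 : C.length = M.length) (hj : j < M.length) :
    (glueQ A M C).getD j [] =
      A.get ⟨j, by omega⟩ :: (M.get ⟨j, hj⟩ ++ [C.get ⟨j, by omega⟩]) := by
  rw [List.getD_eq_getElem _ _ (by rw [length_glueQ _ _ _ h1 h2] ; omega)]
  rw [getElem_glueQ _ _ _ j (by omega) hj (by omega)]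

theorem getElem_cons_append_left {α : Type} (x : α) (l : List α) (y : α) (k : Nat)
    (hk : k < l.length + 1) :
    (x :: (l ++ [y]))[k]'(by simp ; omega) = (x :: l)[k]'(by simpa using hk) := by
  rcases k with _ | j
  · rfl
  · simp only [List.getElem_cons_succ]
    rw [List.getElem_append_left (by omega)]

theorem rot_comm (a : List Int) (m : List (List Int)) (c : List Int)
    (h1 : a.length = m.length) (h2 : c.length = m.length) (hr : 2 ≤ m.length) :
    glueQ (rotateA a m c).1 (rotateA a m c).2.1 (rotateA a m c).2.2
      = rotateB (glueQ a m c) := by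
  -- decompose the three queues: head, middle, last
  cases a with
  | nil => simp only [List.length_nil] at h1 ; omega
  | cons a0 at' =>
  cases m with
  | nil => simp only [List.length_nil] at hr ; omega
  | cons m0 mt =>
  cases c with
  | nil => simp only [List.length_nil, List.length_cons] at h2 hr ; omega
  | cons c0 ct =>
  have hmt : mt ≠ [] := by
    intro he ; subst he
    simp only [List.length_cons, List.length_nil] at hr ; omega
  obtain ⟨mi, ml, hmi⟩ := (List.eq_nil_or_concat mt).resolve_left hmt
  rw [List.concat_eq_append] at hmi ; subst hmi
  have hct : ct ≠ [] := by
    intro he ; subst he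
    simp only [List.length_cons, List.length_nil, List.length_append] at h2 ; omega
  obtain ⟨ci, cl, hci⟩ := (List.eq_nil_or_concat ct).resolve_left hct
  rw [List.concat_eq_append] at hci ; subst hci
  simp only [List.length_cons, List.length_append, List.length_nil] at h1 h2 hr
  have hat : at'.length = mi.length + 1 := by omega
  have hcil : ci.length = mi.length := by omega
  rw [rotateA_eq]
  have hglen : (glueQ (a0 :: at') (m0 :: (mi ++ [ml])) (c0 :: (ci ++ [cl]))).length
      = mi.length + 2 := by
    rw [length_glueQ _ _ _ (by simp [hat]) (by simp [hcil])]
    simp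
  have hcond : ((glueQ (a0 :: at') (m0 :: (mi ++ [ml])) (c0 :: (ci ++ [cl]))).length == 1)
      = false := by simp [hglen]
  simp only [rotateB, PySem.List.foldl_append_singleton_eq_map, hglen]
  rw [if_neg (by simp)]
  apply List.ext_getElem
  · rw [length_glueQ _ _ _ (by simp [hat]) (by simp [hcil])]
    simp [PySem.List.length_pyRange_one]
    omega
  · intro i hL hR
    have hLlen : i < mi.length + 2 := by
      rw [length_glueQ _ _ _ (by simp [hat]) (by simp [hcil])] at hL
      simp at hL ; omega
    rw [getElem_glueQ _ _ _ i (by simp [hat] <;> omega) (by simp <;> omega)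
      (by simp [hcil] <;> omega) hL]
    by_cases hi0 : i = 0
    · subst hi0
      simp only [List.get_eq_getElem, List.getElem_cons_zero]
      rw [List.getElem_append_left (show 0 < at'.length by omega)]
      rw [List.dropLast_concat_getLast]
      -- right side: element 0 of the result list is the new top row
      simp only [List.singleton_append]
      rw [List.getElem_append_left (by simp)]
      rw [List.getElem_cons_zero]
      rw [PySem.List.pyGetD_ofNat' _ 1]
      rw [getD_glueQ _ _ _ 1 (by simp [hat]) (by simp [hcil]) (by simp)]
      rw [PySem.List.pyGetD_zero_cons]
      rw [PySem.List.pyGetD_ofNat' _ 0]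
      rw [getD_glueQ _ _ _ 0 (by simp [hat]) (by simp [hcil]) (by simp)]
      simp only [List.get_eq_getElem, List.getElem_cons_zero, List.getElem_cons_succ]
      rw [PySem.List.slice_to_neg_one]
      rw [show (a0 :: (m0 ++ [c0])) = (a0 :: m0) ++ [c0] by simp, List.dropLast_concat]
    · have hgne : glueQ (a0 :: at') (m0 :: (mi ++ [ml])) (c0 :: (ci ++ [cl])) ≠ [] := by
        intro he ; rw [he] at hglen ; simp at hglen
      by_cases hil : i = mi.length + 1
      · subst hil
        simp only [List.get_eq_getElem, List.getElem_cons_succ]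
        rw [List.getElem_concat_length (by omega)]
        rw [List.getElem_concat_length (by omega)]
        -- right side: the final appended bottom row
        rw [List.getElem_concat_length
          (by simp [PySem.List.length_pyRange_one] ; omega)]
        rw [PySem.List.pyGetD_neg_one _ _ hgne]
        rw [List.getLast_eq_getElem hgne]
        simp only [hglen, show mi.length + 2 - 1 = mi.length + 1 from by omega]
        rw [getElem_glueQ _ _ _ (mi.length + 1) (by simp [hat]) (by simp)
          (by simp [hcil] <;> omega) (by rw [length_glueQ _ _ _ (by simp [hat]) (by simp [hcil])] ; simp)]
        simp only [List.get_eq_getElem, List.getElem_cons_succ]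
        rw [List.getElem_concat_length (by omega)]
        rw [List.getElem_concat_length (by omega)]
        rw [PySem.List.slice_from_one, List.tail_cons]
        rw [PySem.List.pyGetD_neg_ofNat _ 2 _ (by omega) (by rw [hglen] ; omega)]
        simp only [hglen, Nat.add_sub_cancel]
        rw [getElem_glueQ _ _ _ mi.length (by simp [hat] <;> omega) (by simp <;> omega)
          (by simp [hcil] <;> omega) (by rw [hglen] ; omega)]
        rw [show ((a0 :: at').get ⟨mi.length, by simp [hat] <;> omega⟩ :
              Int) :: ((m0 :: (mi ++ [ml])).get ⟨mi.length, by simp <;> omega⟩ ++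
              [(c0 :: (ci ++ [cl])).get ⟨mi.length, by simp [hcil] <;> omega⟩])
            = ((a0 :: at').get ⟨mi.length, by simp [hat] <;> omega⟩ ::
               (m0 :: (mi ++ [ml])).get ⟨mi.length, by simp <;> omega⟩) ++
              [(c0 :: (ci ++ [cl])).get ⟨mi.length, by simp [hcil] <;> omega⟩] from by simp]
        rw [PySem.List.pyGetD_neg_one_append_singleton]
        simp only [List.get_eq_getElem]
        rw [getElem_cons_append_left c0 ci cl mi.length (by omega)]
        rw [← List.cons_append, headI_cons_tail _ (by simp)]
      · -- middle rows: 1 ≤ i ≤ mi.length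
        obtain ⟨j, rfl⟩ : ∃ j, i = j + 1 := ⟨i - 1, by omega⟩
        have hj : j < mi.length := by omega
        simp only [List.get_eq_getElem, List.getElem_cons_succ]
        rw [List.getElem_append_left (by omega)]
        rw [List.getElem_append_left (by omega)]
        -- right side: element j+1 comes from the mapped middle loop
        rw [List.getElem_append_left (by simp [PySem.List.length_pyRange_one] ; omega)]
        simp only [List.singleton_append]
        rw [List.getElem_cons_succ]
        rw [List.getElem_map]
        rw [PySem.List.getElem_pyRange_one _ _ j
          (by simp [PySem.List.length_pyRange_one] ; omega)]
        rw [show (1 : Int) + (j : Int) = ((j + 1 : Nat) : Int) by push_cast ; ring]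
        rw [show ((j + 1 : Nat) : Int) + 1 = ((j + 2 : Nat) : Int) by push_cast ; ring]
        rw [show ((j + 1 : Nat) : Int) - 1 = ((j : Nat) : Int) by push_cast ; ring]
        rw [PySem.List.pyGetD_natCast, PySem.List.pyGetD_natCast, PySem.List.pyGetD_natCast]
        rw [getD_glueQ _ _ _ (j + 2) (by simp [hat]) (by simp [hcil]) (by simp ; omega)]
        rw [getD_glueQ _ _ _ (j + 1) (by simp [hat]) (by simp [hcil]) (by simp ; omega)]
        rw [getD_glueQ _ _ _ j (by simp [hat]) (by simp [hcil]) (by simp ; omega)]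
        rw [PySem.List.pyGetD_zero_cons]
        rw [sliceMid, List.tail_cons]
        simp only [List.get_eq_getElem, List.getElem_cons_succ]
        rw [List.dropLast_concat]
        rw [List.getElem_append_left hj]
        rw [show ((a0 :: at')[j]'(by simp [hat] <;> omega) : Int) ::
              ((m0 :: (mi ++ [ml]))[j]'(by simp <;> omega) ++
               [(c0 :: (ci ++ [cl]))[j]'(by simp [hcil] <;> omega)])
            = (((a0 :: at')[j]'(by simp [hat] <;> omega)) ::
               ((m0 :: (mi ++ [ml]))[j]'(by simp <;> omega))) ++
              [(c0 :: (ci ++ [cl]))[j]'(by simp [hcil] <;> omega)] from by simp]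
        rw [PySem.List.pyGetD_neg_one_append_singleton]
        rw [getElem_cons_append_left c0 ci cl j (by omega)]

theorem rot_comm_one (x z : Int) :
    glueQ (rotateA [x] [[]] [z]).1 (rotateA [x] [[]] [z]).2.1 (rotateA [x] [[]] [z]).2.2
      = rotateB (glueQ [x] [[]] [z]) := rfl

theorem shiftA_length {α : Type} [Inhabited α] (q : List α) (h : q ≠ []) :
    (shiftA q).length = q.length := by
  simp [shiftA]
  cases q with
  | nil => simp at h
  | cons a t => simp

theorem shiftA_mem {α : Type} [Inhabited α] (q : List α) (h : q ≠ []) :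
    ∀ x ∈ shiftA q, x ∈ q := by
  intro x hx
  simp only [shiftA, List.mem_cons] at hx
  rcases hx with hx | hx
  · obtain ⟨s, y, hs⟩ := (List.eq_nil_or_concat q).resolve_left h
    rw [List.concat_eq_append] at hs ; subst hs
    rw [List.getLast?_concat] at hx
    simp at hx
    simp [hx]
  · exact List.dropLast_subset q hx

theorem shift_comm (a : List Int) (m : List (List Int)) (c : List Int)
    (h1 : a.length = m.length) (h2 : c.length = m.length) (hm : m ≠ []) :
    glueQ (shiftA a) (shiftA m) (shiftA c)
      = PySem.List.slice (glueQ a m c) (some (-1)) none ++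
        PySem.List.slice (glueQ a m c) none (some (-1)) := by
  have ha : a ≠ [] := by
    intro he ; subst he
    exact hm (List.length_eq_zero_iff.mp h1.symm)
  have hc : c ≠ [] := by
    intro he ; subst he
    exact hm (List.length_eq_zero_iff.mp h2.symm)
  obtain ⟨ai, al, has⟩ := (List.eq_nil_or_concat a).resolve_left ha
  rw [List.concat_eq_append] at has ; subst has
  obtain ⟨mi2, ml2, hms⟩ := (List.eq_nil_or_concat m).resolve_left hm
  rw [List.concat_eq_append] at hms ; subst hms
  obtain ⟨ci2, cl2, hcs⟩ := (List.eq_nil_or_concat c).resolve_left hc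
  rw [List.concat_eq_append] at hcs ; subst hcs
  simp only [List.length_append, List.length_nil, List.length_cons] at h1 h2
  have hshift : ∀ {α : Type} [Inhabited α] (l : List α) (x : α),
      shiftA (l ++ [x]) = x :: l := by
    intro α _ l x
    simp [shiftA, List.getLast?_concat, List.dropLast_concat]
  rw [hshift, hshift, hshift]
  rw [glueQ_cons]
  rw [glueQ_append _ _ _ _ _ _ (by omega) (by omega)]
  rw [PySem.List.slice_from_neg_one, PySem.List.slice_to_neg_one]
  have hgl : (glueQ ai mi2 ci2 ++ glueQ [al] [ml2] [cl2]).length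
      = mi2.length + 1 := by
    rw [List.length_append, length_glueQ _ _ _ (by omega) (by omega)]
    rfl
  rw [hgl]
  have hl2 : mi2.length = (glueQ ai mi2 ci2).length := by
    rw [length_glueQ _ _ _ (by omega) (by omega)]
  rw [show mi2.length + 1 - 1 = mi2.length by omega, hl2]
  rw [List.drop_left]
  have : glueQ [al] [ml2] [cl2] = [al :: (ml2 ++ [cl2])] := rfl
  rw [this, List.dropLast_concat]
  rfl

-- proof-side names for the two fold bodies (definitionally the lambdas in the ports)
def stepAFn (s : List Int × List (List Int) × List Int) (op : String) :
    List Int × List (List Int) × List Int :=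
  if op == "Rotate" then rotateA s.1 s.2.1 s.2.2
  else (shiftA s.1, shiftA s.2.1, shiftA s.2.2)

def stepBFn (g : List (List Int)) (op : String) : List (List Int) :=
  if op == "Rotate" then rotateB g
  else PySem.List.slice g (some (-1)) none ++ PySem.List.slice g none (some (-1))

theorem rotateA_inv (k : Nat) (a : List Int) (m : List (List Int)) (c : List Int)
    (h1 : a.length = m.length) (h2 : c.length = m.length) (hr : 2 ≤ m.length)
    (hk : ∀ x ∈ m, x.length = k) :
    (rotateA a m c).1.length = m.length ∧ (rotateA a m c).2.1.length = m.length ∧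
    (rotateA a m c).2.2.length = m.length ∧ (∀ x ∈ (rotateA a m c).2.1, x.length = k) := by
  cases a with
  | nil => simp only [List.length_nil] at h1 ; omega
  | cons a0 at' =>
  cases m with
  | nil => simp only [List.length_nil] at hr ; omega
  | cons m0 mt =>
  cases c with
  | nil => simp only [List.length_nil, List.length_cons] at h2 hr ; omega
  | cons c0 ct =>
  have hmt : mt ≠ [] := by
    intro he ; subst he
    simp only [List.length_cons, List.length_nil] at hr ; omega
  obtain ⟨mi, ml, hmi⟩ := (List.eq_nil_or_concat mt).resolve_left hmt
  rw [List.concat_eq_append] at hmi ; subst hmi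
  have hct : ct ≠ [] := by
    intro he ; subst he
    simp only [List.length_cons, List.length_nil, List.length_append] at h2 ; omega
  obtain ⟨ci, cl, hci⟩ := (List.eq_nil_or_concat ct).resolve_left hct
  rw [List.concat_eq_append] at hci ; subst hci
  simp only [List.length_cons, List.length_append, List.length_nil] at h1 h2 hr
  rw [rotateA_eq]
  refine ⟨by simp <;> omega, by simp <;> omega, by simp <;> omega, ?_⟩
  intro x hx
  simp only [List.mem_cons, List.mem_append, List.mem_singleton, List.not_mem_nil,
    or_false] at hx
  rcases hx with hx | hx | hx
  · subst hx
    have h := hk m0 (by simp)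
    simp only [List.length_dropLast, List.length_cons]
    omega
  · exact hk x (by simp [hx])
  · rw [hx]
    have h := hk ml (by simp)
    simp only [List.length_tail, List.length_append, List.length_cons, List.length_nil]
    omega

theorem rotateA_one (x z : Int) : rotateA [x] [[]] [z] = ([z], [[]], [x]) := rfl

theorem loop_comm (k : Nat) (ops : List String) :
    ∀ (a : List Int) (m : List (List Int)) (c : List Int),
    a.length = m.length → c.length = m.length → 1 ≤ m.length →
    (∀ x ∈ m, x.length = k) →
    (∀ op ∈ ops, op = "Rotate" → 2 ≤ m.length ∨ m = [[]]) →
    glueQ (ops.foldl stepAFn (a, m, c)).1 (ops.foldl stepAFn (a, m, c)).2.1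
        (ops.foldl stepAFn (a, m, c)).2.2
      = ops.foldl stepBFn (glueQ a m c)
    ∧ (ops.foldl stepAFn (a, m, c)).1.length = m.length
    ∧ (ops.foldl stepAFn (a, m, c)).2.1.length = m.length
    ∧ (ops.foldl stepAFn (a, m, c)).2.2.length = m.length
    ∧ (∀ x ∈ (ops.foldl stepAFn (a, m, c)).2.1, x.length = k) := by
  induction ops with
  | nil =>
      intro a m c h1 h2 hm hk _
      exact ⟨rfl, h1, rfl, h2, hk⟩
  | cons op rest ih =>
      intro a m c h1 h2 hm hk hops
      rw [List.foldl_cons, List.foldl_cons]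
      have hmne : m ≠ [] := by
        intro he ; rw [he] at hm ; simp at hm
      -- one step
      have hstep :
          glueQ (stepAFn (a, m, c) op).1 (stepAFn (a, m, c) op).2.1
              (stepAFn (a, m, c) op).2.2 = stepBFn (glueQ a m c) op
          ∧ (stepAFn (a, m, c) op).1.length = m.length
          ∧ (stepAFn (a, m, c) op).2.1.length = m.length
          ∧ (stepAFn (a, m, c) op).2.2.length = m.length
          ∧ (∀ x ∈ (stepAFn (a, m, c) op).2.1, x.length = k) := by
        by_cases hop : (op == "Rotate") = true
        · have hrot := hops op (by simp) (by simpa using hop)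
          simp only [stepAFn, stepBFn, hop, if_true]
          rcases hrot with hrot | hrot
          · have hi := rotateA_inv k a m c h1 h2 hrot hk
            exact ⟨rot_comm a m c h1 h2 hrot, hi.1, hi.2.1, hi.2.2.1, hi.2.2.2⟩
          · subst hrot
            cases a with
            | nil => simp at h1
            | cons x a' =>
            cases c with
            | nil => simp at h2
            | cons z c' =>
            have ha' : a' = [] := by
              simp at h1 ; exact h1
            have hc' : c' = [] := by
              simp at h2 ; exact h2
            subst ha' ; subst hc'
            refine ⟨rot_comm_one x z, ?_⟩
            rw [rotateA_one]
            refine ⟨rfl, rfl, rfl, ?_⟩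
            intro y hy
            simp at hy
            rw [hy]
            have := hk [] (by simp)
            simpa using this
        · simp only [stepAFn, stepBFn, hop, Bool.false_eq_true, if_false]
          refine ⟨shift_comm a m c h1 h2 hmne, ?_, ?_, ?_, ?_⟩
          · rw [shiftA_length a (by intro he ; subst he ; simp at h1 ; omega)] ; exact h1
          · rw [shiftA_length m hmne]
          · rw [shiftA_length c (by intro he ; subst he ; simp at h2 ; omega)] ; exact h2
          · intro x hx
            exact hk x (shiftA_mem m hmne x hx)
      obtain ⟨hg, hl1, hl2, hl3, hmem⟩ := hstep
      have hrest := ih (stepAFn (a, m, c) op).1 (stepAFn (a, m, c) op).2.1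
        (stepAFn (a, m, c) op).2.2 (by omega) (by omega) (by omega) hmem
        (by
          intro o ho hoeq
          rcases hops o (by simp [ho]) hoeq with h | h
          · left ; omega
          · right
            -- m = [[]] is preserved by every step
            subst h
            cases a with
            | nil => simp at h1
            | cons x a' =>
            cases c with
            | nil => simp at h2
            | cons z c' =>
            have ha' : a' = [] := by
              simp at h1 ; exact h1
            have hc' : c' = [] := by
              simp at h2 ; exact h2
            subst ha' ; subst hc'
            by_cases hop : (op == "Rotate") = true
            · simp only [stepAFn, hop, if_true, rotateA_one]
            · simp only [stepAFn, hop, Bool.false_eq_true, if_false]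
              rfl)
      simp only [Prod.mk.eta] at hrest
      rcases hrest with ⟨hg2, hb1, hb2, hb3, hbm⟩
      refine ⟨?_, by omega, by omega, by omega, hbm⟩
      rw [hg2, hg]

theorem solution_unfold (rc : List (List Int)) (ops : List String) :
    solution rc ops = rebuildA rc 0
      (ops.foldl stepAFn
        ((PySem.List.pyRange 0 rc.length 1).map
          (fun y => PySem.List.pyGetD (PySem.List.pyGetD rc y []) 0 0),
         (PySem.List.pyRange 0 rc.length 1).map
          (fun y => (PySem.List.pyRange 1 ((PySem.List.pyGetD rc 0 []).length - 1) 1).map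
            (fun x => PySem.List.pyGetD (PySem.List.pyGetD rc y []) x 0)),
         (PySem.List.pyRange 0 rc.length 1).map
          (fun y => PySem.List.pyGetD (PySem.List.pyGetD rc y []) (-1) 0))).1
      (ops.foldl stepAFn
        ((PySem.List.pyRange 0 rc.length 1).map
          (fun y => PySem.List.pyGetD (PySem.List.pyGetD rc y []) 0 0),
         (PySem.List.pyRange 0 rc.length 1).map
          (fun y => (PySem.List.pyRange 1 ((PySem.List.pyGetD rc 0 []).length - 1) 1).map
            (fun x => PySem.List.pyGetD (PySem.List.pyGetD rc y []) x 0)),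
         (PySem.List.pyRange 0 rc.length 1).map
          (fun y => PySem.List.pyGetD (PySem.List.pyGetD rc y []) (-1) 0))).2.1
      (ops.foldl stepAFn
        ((PySem.List.pyRange 0 rc.length 1).map
          (fun y => PySem.List.pyGetD (PySem.List.pyGetD rc y []) 0 0),
         (PySem.List.pyRange 0 rc.length 1).map
          (fun y => (PySem.List.pyRange 1 ((PySem.List.pyGetD rc 0 []).length - 1) 1).map
            (fun x => PySem.List.pyGetD (PySem.List.pyGetD rc y []) x 0)),
         (PySem.List.pyRange 0 rc.length 1).map
          (fun y => PySem.List.pyGetD (PySem.List.pyGetD rc y []) (-1) 0))).2.2 := rfl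

theorem solution_alt_unfold (rc : List (List Int)) (ops : List String) :
    solution_alt rc ops = ops.foldl stepBFn (rc.map (fun row => row)) := rfl

-- ===== VERDICT (by name: the statement is the Claim_ definition above) =====
theorem solution_spec : Claim_equal_solution := by
  unfold Claim_equal_solution
  intro rc ops hdom hpre
  unfold Spec_solution
  obtain ⟨hrows, hemp, hnd⟩ := hpre
  cases rc with
  | nil =>
      rw [hemp rfl]
      rfl
  | cons r0 rest =>
      have hw2 : 2 ≤ r0.length := (hrows r0 (by simp)).2
      have hall : ∀ row ∈ r0 :: rest, row.length = r0.length := by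
        intro row h
        simpa using (hrows row h).1
      rw [solution_unfold, solution_alt_unfold]
      rw [map_pyRange_getD (r0 :: rest) (fun row => PySem.List.pyGetD row 0 0)]
      rw [map_pyRange_getD (r0 :: rest) (fun row => PySem.List.pyGetD row (-1) 0)]
      rw [map_pyRange_getD (r0 :: rest) (fun row =>
        (PySem.List.pyRange 1 ((PySem.List.pyGetD (r0 :: rest) 0 []).length - 1) 1).map
          (fun x => PySem.List.pyGetD row x 0))]
      rw [show (PySem.List.pyGetD (r0 :: rest) 0 []) = r0 from PySem.List.pyGetD_zero_cons _ _ _]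
      rw [List.map_congr_left (fun row (h : row ∈ r0 :: rest) =>
        midRow row r0.length (hall row h) hw2)]
      -- the glued initial state is rc itself
      have hglue : glueQ ((r0 :: rest).map (fun row => PySem.List.pyGetD row 0 0))
          ((r0 :: rest).map (fun row => row.tail.dropLast))
          ((r0 :: rest).map (fun row => PySem.List.pyGetD row (-1) 0)) = r0 :: rest := by
        rw [glueQ_map]
        rw [List.map_congr_left (fun row (h : row ∈ r0 :: rest) =>
          rowGlue row (by rw [hall row h] ; exact hw2))]
        exact List.map_id _
      have hmem : ∀ x ∈ (r0 :: rest).map (fun row => row.tail.dropLast),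
          x.length = r0.length - 2 := by
        intro x hx
        obtain ⟨row, hrow, hx⟩ := List.mem_map.mp hx
        rw [← hx]
        have := hall row hrow
        simp only [List.length_dropLast, List.length_tail]
        omega
      have hops : ∀ op ∈ ops, op = "Rotate" →
          2 ≤ ((r0 :: rest).map (fun row => row.tail.dropLast)).length ∨
          (r0 :: rest).map (fun row => row.tail.dropLast) = [[]] := by
        intro op hop hrot
        by_cases hrc2 : 2 ≤ (r0 :: rest).length
        · left ; simpa using hrc2
        · have hrest : rest = [] := by
            cases rest with
            | nil => rfl
            | cons _ _ => simp at hrc2 <;> omega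
          subst hrest
          by_cases hw3 : 3 ≤ r0.length
          · exfalso
            exact hnd ⟨by simp, by simpa using hw3, by rw [← hrot] ; exact hop⟩
          · right
            have hw : r0.length = 2 := by omega
            simp only [List.map_cons, List.map_nil]
            have : (r0.tail.dropLast).length = 0 := by
              simp only [List.length_dropLast, List.length_tail]
              omega
            rw [List.length_eq_zero_iff.mp this]
      obtain ⟨hg, hf1, hf2, hf3, hfm⟩ := loop_comm (r0.length - 2) ops
        ((r0 :: rest).map (fun row => PySem.List.pyGetD row 0 0))
        ((r0 :: rest).map (fun row => row.tail.dropLast))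
        ((r0 :: rest).map (fun row => PySem.List.pyGetD row (-1) 0))
        (by simp) (by simp) (by simp) hmem hops
      have hreb := rebuildEq r0.length
        ((ops.foldl stepAFn
          ((r0 :: rest).map (fun row => PySem.List.pyGetD row 0 0),
           (r0 :: rest).map (fun row => row.tail.dropLast),
           (r0 :: rest).map (fun row => PySem.List.pyGetD row (-1) 0))).2.1)
        [] (r0 :: rest)
        ((ops.foldl stepAFn
          ((r0 :: rest).map (fun row => PySem.List.pyGetD row 0 0),
           (r0 :: rest).map (fun row => row.tail.dropLast),
           (r0 :: rest).map (fun row => PySem.List.pyGetD row (-1) 0))).1)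
        ((ops.foldl stepAFn
          ((r0 :: rest).map (fun row => PySem.List.pyGetD row 0 0),
           (r0 :: rest).map (fun row => row.tail.dropLast),
           (r0 :: rest).map (fun row => PySem.List.pyGetD row (-1) 0))).2.2)
        (by simp at hf2 ⊢ ; omega)
        (by simp at hf1 hf2 ⊢ ; omega)
        (by simp at hf3 hf2 ⊢ ; omega)
        (by intro x hx ; have := hfm x hx ; omega)
        hall
      simp only [List.nil_append, List.length_nil] at hreb
      rw [hreb, hg, hglue]
      congr 1
      exact (List.map_id _).symm
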